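-- pv_equiv track=rewrite | github.com/ignajaja/coding-II | practica/composicion_numeros.py | posiciones_impares
-- ===== SOURCE A (Python) =====
-- def posiciones_impares(numero):
--     exponente = 0
--     contador = 0
--     acumulador = 0
--     while numero > 0:
--         if not contador % 2 == 0:
--             acumulador += (numero % 10) * (10**exponente)
--             exponente += 1
--         contador += 1
--         numero //= 10
--     return acumulador
-- ===== SOURCE B (Python) =====
-- def posiciones_impares(numero):
--     if numero <= 0:
--         return 0
--     return numero // 10 % 10 + 10 * posiciones_impares(numero // 100)
-- ===== Notes on version B (the rewrite author's own statement) =====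
-- stated objective: simpler
-- what changed: Replaced the while loop with its parity counter, exponent and accumulator state by a direct recursion that takes the tens digit and recurses on numero // 100.
import Mathlib
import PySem

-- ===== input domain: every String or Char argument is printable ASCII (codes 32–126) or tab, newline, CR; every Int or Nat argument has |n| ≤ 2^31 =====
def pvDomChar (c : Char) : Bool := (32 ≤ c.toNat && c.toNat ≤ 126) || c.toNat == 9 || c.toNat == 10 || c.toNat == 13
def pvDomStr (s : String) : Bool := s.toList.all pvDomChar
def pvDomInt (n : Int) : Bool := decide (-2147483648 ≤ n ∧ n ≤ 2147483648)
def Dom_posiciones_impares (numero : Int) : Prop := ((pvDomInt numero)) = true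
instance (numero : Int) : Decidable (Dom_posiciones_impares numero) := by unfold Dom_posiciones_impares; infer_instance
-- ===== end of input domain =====

-- B replaces A's while loop (parity counter + exponent + accumulator) by a direct
-- recursion on numero // 100 taking the tens digit each step; objective: simpler.


-- ===== PORT A =====
-- The while loop of A, state (numero, exponente, contador, acumulador).
-- '10**exponente' is ported as '10 ^ exponente.toNat': exponente starts at 0 and is only
-- ever incremented, so it is nonnegative and Python's int power agrees with this.
def pvLoopA (numero exponente contador acumulador : Int) : Int :=
  if h : numero > 0 then
    if ¬ PySem.Int.mod contador 2 = 0 then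
      pvLoopA (PySem.Int.floordiv numero 10) (exponente + 1) (contador + 1)
        (acumulador + PySem.Int.mod numero 10 * 10 ^ exponente.toNat)
    else
      pvLoopA (PySem.Int.floordiv numero 10) exponente (contador + 1) acumulador
  else acumulador
termination_by numero.toNat
decreasing_by
  all_goals
    have h1 := (PySem.Int.floordiv_lt_iff_lt_mul (a := numero) (b := 10) (q := numero) (by omega)).mpr (by omega)
    have h2 : PySem.Int.floordiv numero 10 = numero / 10 := PySem.Int.floordiv_eq_ediv_of_pos (by omega)
    have h3 := Int.ediv_nonneg (le_of_lt h) (by omega : (0:Int) ≤ 10)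
    omega

def posiciones_impares (numero : Int) : Int := pvLoopA numero 0 0 0

-- ===== PORT B =====
def posiciones_impares_alt (numero : Int) : Int :=
  if numero ≤ 0 then 0
  else PySem.Int.mod (PySem.Int.floordiv numero 10) 10 +
        10 * posiciones_impares_alt (PySem.Int.floordiv numero 100)
termination_by numero.toNat
decreasing_by
  have h : 0 < numero := by omega
  have h1 := (PySem.Int.floordiv_lt_iff_lt_mul (a := numero) (b := 100) (q := numero) (by omega)).mpr (by omega)
  have h2 : PySem.Int.floordiv numero 100 = numero / 100 := PySem.Int.floordiv_eq_ediv_of_pos (by omega)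
  have h3 := Int.ediv_nonneg (le_of_lt h) (by omega : (0:Int) ≤ 100)
  omega

-- ===== PRECONDITION & SPEC =====
def Spec_posiciones_impares (numero : Int) (out : Int) : Prop := out = posiciones_impares_alt numero
instance (numero : Int) (out : Int) : Decidable (Spec_posiciones_impares numero out) := by unfold Spec_posiciones_impares; infer_instance

-- ===== CLAIM (what is proved, stated in full; the proofs are below) =====
def Claim_equal_posiciones_impares : Prop := ∀ (numero : Int), Dom_posiciones_impares numero → Spec_posiciones_impares numero (posiciones_impares numero)

-- ===== LEMMAS AND PROOFS =====

theorem alt_nonpos {n : Int} (h : n ≤ 0) : posiciones_impares_alt n = 0 := by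
  rw [posiciones_impares_alt]; simp [h]

theorem alt_pos {n : Int} (h : 0 < n) :
    posiciones_impares_alt n =
      (n / 10) % 10 + 10 * posiciones_impares_alt (n / 100) := by
  rw [posiciones_impares_alt]
  rw [PySem.Int.floordiv_eq_ediv_of_pos (by omega : (0:Int) < 10),
      PySem.Int.floordiv_eq_ediv_of_pos (by omega : (0:Int) < 100),
      PySem.Int.mod_eq_emod_of_pos (by omega : (0:Int) < 10)]
  simp [not_le.mpr h]

theorem pvLoopA_key : ∀ (k : Nat) (n e c acc : Int), n.toNat ≤ k → 0 ≤ e →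
    c % 2 = 0 →
    pvLoopA n e c acc = acc + 10 ^ e.toNat * posiciones_impares_alt n := by
  intro k
  induction k with
  | zero =>
    intro n e c acc hk _ _
    have hn : n ≤ 0 := by omega
    rw [pvLoopA, alt_nonpos hn]
    simp [not_lt.mpr hn]
  | succ k ih =>
    intro n e c acc hk he hc
    by_cases hn : 0 < n
    · have hmodc : PySem.Int.mod c 2 = 0 := by
        rw [PySem.Int.mod_eq_emod_of_pos (by omega : (0:Int) < 2)]; exact hc
      rw [pvLoopA]
      simp only [hn, dif_pos, hmodc, not_true_eq_false, if_false]
      set m := PySem.Int.floordiv n 10 with hm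
      have hm10 : m = n / 10 := PySem.Int.floordiv_eq_ediv_of_pos (by omega)
      have hm0 : 0 ≤ m := hm10 ▸ Int.ediv_nonneg (le_of_lt hn) (by omega)
      have hmlt : m.toNat ≤ k := by
        have := (PySem.Int.floordiv_lt_iff_lt_mul (a := n) (b := 10) (q := n) (by omega)).mpr (by omega)
        omega
      by_cases hmp : 0 < m
      · -- second iteration: odd contador, digit is taken
        have hmodc1 : ¬ PySem.Int.mod (c + 1) 2 = 0 := by
          rw [PySem.Int.mod_eq_emod_of_pos (by omega : (0:Int) < 2)]; omega
        rw [pvLoopA]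
        simp only [hmp, dif_pos, hmodc1, not_false_eq_true, if_true]
        have hmm : PySem.Int.floordiv m 10 = n / 100 := by
          rw [PySem.Int.floordiv_eq_ediv_of_pos (by omega : (0:Int) < 10), hm10]
          rw [Int.ediv_ediv_of_nonneg (by omega : (0:Int) ≤ 10)]
          norm_num
        have hmmlt : (PySem.Int.floordiv m 10).toNat ≤ k := by
          have := (PySem.Int.floordiv_lt_iff_lt_mul (a := m) (b := 10) (q := m) (by omega)).mpr (by omega)
          have h2' : PySem.Int.floordiv m 10 = m / 10 := PySem.Int.floordiv_eq_ediv_of_pos (by omega)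
          have := Int.ediv_nonneg (le_of_lt hmp) (by omega : (0:Int) ≤ 10)
          omega
        have hcc : (c + 1 + 1) % 2 = 0 := by omega
        rw [ih _ (e + 1) _ _ hmmlt (by omega) hcc]
        rw [alt_pos hn, hmm]
        have hmodm : PySem.Int.mod m 10 = (n / 10) % 10 := by
          rw [PySem.Int.mod_eq_emod_of_pos (by omega : (0:Int) < 10), hm10]
        have hepow : (e + 1).toNat = e.toNat + 1 := by omega
        rw [hmodm, hepow]
        ring
      · -- second iteration: loop exits; n has a single digit, alt n = 0
        have hmz : m = 0 := by omega
        rw [pvLoopA]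
        simp only [hmp, dif_neg, not_false_eq_true]
        rw [alt_pos hn]
        have h1 : n / 10 = 0 := by rw [← hm10, hmz]
        have h2 : n / 100 = 0 := by
          have : n / 10 / 10 = n / 100 := by
            rw [Int.ediv_ediv_of_nonneg (by omega : (0:Int) ≤ 10)]; norm_num
          rw [← this, h1]; simp
        rw [h1, h2, alt_nonpos (le_refl 0)]
        simp
    · rw [pvLoopA, alt_nonpos (by omega : n ≤ 0)]
      simp [hn]

-- ===== VERDICT (by name: the statement is the Claim_ definition above) =====
theorem posiciones_impares_spec : Claim_equal_posiciones_impares := by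
  intro numero _
  unfold Spec_posiciones_impares posiciones_impares
  rw [pvLoopA_key numero.toNat numero 0 0 0 (le_refl _) (le_refl 0) rfl]
  simp
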